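-- pv_equiv track=rewrite | github.com/B0T5ter/Laby-semestr-3 | zestaw 1/zad4.py | miniIndMax
-- ===== SOURCE A (Python) =====
-- def miniIndMax(arr):
--     ret = arr[0]
--     ind = 0
--     for x in range(1, len(arr)):
--         if arr[x] <= ret:
--             ret = arr[x]
--             ind = x
--     return ret, ind
-- ===== SOURCE B (Python) =====
-- def miniIndMax(arr):
--     # Two separate passes: first the minimum value (strict <),
--     # then the last index at which it occurs (== keeps the last one,
--     # matching A's <= tie rule).
--     m = arr[0]
--     for v in arr:
--         if v < m:
--             m = v
--     ind = 0
--     for i, v in enumerate(arr):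
--         if v == m:
--             ind = i
--     return m, ind
-- ===== Notes on version B (the rewrite author's own statement) =====
-- stated objective: alternative
-- what changed: Replaces A's single coupled scan that updates (min,index) together with two independent passes: one computing the minimum value with strict <, one recording the last index equal to it.
import Mathlib
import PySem

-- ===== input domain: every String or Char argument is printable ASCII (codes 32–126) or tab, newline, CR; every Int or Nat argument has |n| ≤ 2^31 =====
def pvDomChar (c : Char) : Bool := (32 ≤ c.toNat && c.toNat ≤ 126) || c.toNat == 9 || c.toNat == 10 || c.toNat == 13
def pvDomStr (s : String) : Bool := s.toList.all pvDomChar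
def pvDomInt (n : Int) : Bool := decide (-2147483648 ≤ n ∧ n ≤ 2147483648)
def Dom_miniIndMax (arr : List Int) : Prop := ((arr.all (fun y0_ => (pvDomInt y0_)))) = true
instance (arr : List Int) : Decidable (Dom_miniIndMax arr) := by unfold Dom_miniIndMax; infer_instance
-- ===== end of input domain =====

-- B replaces A's single coupled (min,index) scan by two independent passes
-- (min value with <, then last index equal to it); same cost, plainer decomposition.

-- ===== PORT A =====
-- ret = arr[0]; for x in range(1, len(arr)): if arr[x] <= ret: ret, ind = arr[x], x
-- arr[x] is always in range inside the loop, so pyGetD with default 0 is exact;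
-- arr[0] is in range under Pre_ (arr ≠ []).
def miniIndMax (arr : List Int) : Int × Int :=
  (PySem.List.pyRange 1 (PySem.List.len arr) 1).foldl
    (fun s x =>
      if PySem.List.pyGetD arr x 0 ≤ s.1 then (PySem.List.pyGetD arr x 0, x) else s)
    (PySem.List.pyGetD arr 0 0, 0)

-- ===== PORT B =====
-- m = arr[0]; for v in arr: if v < m: m = v;
-- ind = 0; for i, v in enumerate(arr): if v == m: ind = i
def miniIndMax_alt (arr : List Int) : Int × Int :=
  let m := arr.foldl (fun m v => if v < m then v else m) (PySem.List.pyGetD arr 0 0)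
  let ind := (PySem.List.enumerate arr 0).foldl
    (fun ind p => if p.2 = m then p.1 else ind) 0
  (m, ind)

-- ===== PRECONDITION & SPEC =====
-- Pre_ excludes only the empty list, on which A raises IndexError (arr[0]).
def Pre_miniIndMax (arr : List Int) : Prop := arr ≠ []
instance (arr : List Int) : Decidable (Pre_miniIndMax arr) := by unfold Pre_miniIndMax; infer_instance
def pvWitness_miniIndMax : List Int := ([3, 1, 2, 1])

def Spec_miniIndMax (arr : List Int) (out : Int × Int) : Prop := out = miniIndMax_alt arr
instance (arr : List Int) (out : Int × Int) : Decidable (Spec_miniIndMax arr out) := by unfold Spec_miniIndMax; infer_instance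

-- ===== CLAIM (what is proved, stated in full; the proofs are below) =====
def Claim_equal_miniIndMax : Prop := ∀ (arr : List Int), Dom_miniIndMax arr → Pre_miniIndMax arr → Spec_miniIndMax arr (miniIndMax arr)

-- ===== LEMMAS AND PROOFS =====

-- A's coupled step, written on enumerated pairs.
def pvStepA (s : Int × Int) (p : Int × Int) : Int × Int :=
  if p.2 ≤ s.1 then (p.2, p.1) else s

-- B's strict-min fold.
def pvMinF (l : List Int) (m : Int) : Int :=
  l.foldl (fun m v => if v < m then v else m) m

theorem pvMinF_append (l : List Int) (x m : Int) :
    pvMinF (l ++ [x]) m = if x < pvMinF l m then x else pvMinF l m := by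
  simp [pvMinF, List.foldl_append]

-- Core invariant: A's coupled fold over `enumerate l s` computes B's strict min
-- together with B's last-index-equal-to-the-final-min fold.
theorem pvKey (l : List Int) (s m i0 : Int) :
    (PySem.List.enumerate l s).foldl pvStepA (m, i0)
      = (pvMinF l m,
         (PySem.List.enumerate l s).foldl
           (fun j p => if p.2 = pvMinF l m then p.1 else j) i0) := by
  induction l using List.reverseRecOn with
  | nil => simp [pvMinF, PySem.List.enumerate_nil]
  | append_singleton l x ih =>
    have he : PySem.List.enumerate (l ++ [x]) s
        = PySem.List.enumerate l s ++ [(s + l.length, x)] := by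
      simp [PySem.List.enumerate_append, PySem.List.enumerate_cons, PySem.List.enumerate_nil]
    rw [he]
    simp only [List.foldl_append, List.foldl_cons, List.foldl_nil, ih, pvMinF_append]
    by_cases hx : x < pvMinF l m
    · simp [pvStepA, le_of_lt hx, hx]
    · by_cases hex : x = pvMinF l m
      · simp [pvStepA, hex]
      · have hlt : pvMinF l m < x := lt_of_le_of_ne (not_lt.mp hx) (fun h => hex h.symm)
        simp [pvStepA, hx, hex, not_le.mpr hlt]

-- A's pyRange-indexed fold equals the enumerate fold (the skipped 0-th step is a no-op).
theorem pvA_enum (a : Int) (rest : List Int) :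
    miniIndMax (a :: rest)
      = (PySem.List.enumerate (a :: rest) 0).foldl pvStepA (a, 0) := by
  have hlen : PySem.List.len (a :: rest) = ((a :: rest).length : Int) := by
    simp [PySem.List.len_eq]
  have hpos : (0 : Int) < PySem.List.len (a :: rest) := by
    rw [hlen]; exact_mod_cast Nat.succ_pos rest.length
  rw [PySem.List.enumerate_eq_map_pyRange (d := 0), List.foldl_map]
  rw [PySem.List.pyRange_one_cons hpos, List.foldl_cons]
  simp [miniIndMax, pvStepA, PySem.List.pyGetD_zero_cons]

-- ===== VERDICT (by name: the statement is the Claim_ definition above) =====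
theorem miniIndMax_spec : Claim_equal_miniIndMax := by
  intro arr _ hpre
  unfold Spec_miniIndMax
  match arr, hpre with
  | a :: rest, _ =>
    rw [pvA_enum, pvKey]
    simp only [miniIndMax_alt, pvMinF, PySem.List.pyGetD_zero_cons, List.foldl_cons]
    simp
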